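-- pv_equiv track=rewrite | github.com/Justant-source/Toeic-Brain | scripts/process/categorize.py | count_prefix_sharers
-- ===== SOURCE A (Python) =====
-- def longest_common_prefix(words: list[str]) -> str:
--     if not words:
--         return ""
--     prefix = words[0]
--     for w in words[1:]:
--         while not w.startswith(prefix):
--             prefix = prefix[:-1]
--             if not prefix:
--                 return ""
--     return prefix
--
-- def count_prefix_sharers(words: list[str], min_len: int = 4) -> int:
--     """Return how many words share a common prefix of at least min_len chars with any other word."""
--     sharers = set()
--     for i, a in enumerate(words):
--         for j, b in enumerate(words):
--             if i != j:
--                 lcp = longest_common_prefix([a, b])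
--                 if len(lcp) >= min_len:
--                     sharers.add(i)
--                     sharers.add(j)
--     return len(sharers)
-- ===== SOURCE B (Python) =====
-- def count_prefix_sharers(words: list[str], min_len: int = 4) -> int:
--     """Return how many words share a common prefix of at least min_len chars with any other word."""
--     k = max(min_len, 0)
--     prefixes = [w[:k] for w in words if len(w) >= k]
--     counts = {}
--     for p in prefixes:
--         counts[p] = counts.get(p, 0) + 1
--     return sum(1 for w in words if len(w) >= k and counts[w[:k]] >= 2)
-- ===== Notes on version B (the rewrite author's own statement) =====
-- stated objective: faster
-- what changed: Instead of comparing every pair of words with longest_common_prefix and collecting sharer indices in a set, B buckets the words once by their first max(min_len,0) characters in a dict of counts and counts the words whose bucket has size >= 2.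
import Mathlib
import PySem

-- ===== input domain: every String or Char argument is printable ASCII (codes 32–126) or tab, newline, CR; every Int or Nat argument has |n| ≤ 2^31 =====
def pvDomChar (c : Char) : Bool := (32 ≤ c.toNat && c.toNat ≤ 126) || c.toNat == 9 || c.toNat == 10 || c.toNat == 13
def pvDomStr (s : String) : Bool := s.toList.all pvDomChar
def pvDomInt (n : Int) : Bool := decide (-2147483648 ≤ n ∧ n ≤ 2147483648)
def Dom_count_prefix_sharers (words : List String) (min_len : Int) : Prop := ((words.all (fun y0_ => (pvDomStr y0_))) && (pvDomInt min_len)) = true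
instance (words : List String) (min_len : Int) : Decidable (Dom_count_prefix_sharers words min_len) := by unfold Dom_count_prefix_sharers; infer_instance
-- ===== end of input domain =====

-- B replaces A's all-pairs longest-common-prefix scan by grouping the words once on their first
-- max(min_len, 0) characters with a dict and counting members of groups of size ≥ 2 (objective: faster).

-- ===== PORT A =====
-- the 'while not w.startswith(prefix): prefix = prefix[:-1]; if not prefix: return ""' loop of
-- longest_common_prefix; 'none' models the early 'return ""' out of the enclosing function
def pvShrink (w : List Char) (pfx : List Char) : Option (List Char) :=
  if PySem.Chars.startswith w pfx then some pfx
  else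
    let p := pfx.dropLast
    if p = [] then none else pvShrink w p
termination_by pfx.length
decreasing_by
  cases pfx with
  | nil => rename_i h1 h2; exact absurd rfl h2
  | cons c cs => simp


def longest_common_prefix (words : List String) : String :=
  match words with
  | [] => ""
  | w0 :: rest =>
    match rest.foldl (fun acc w =>
        match acc with
        | none => none
        | some pfx => pvShrink w.toList pfx) (some w0.toList) with
    | none => ""
    | some p => String.ofList p


def count_prefix_sharers (words : List String) (min_len : Int) : Int :=
  let sharers : PySem.Set Int :=
    (PySem.List.enumerate words 0).foldl (fun s ia =>
      (PySem.List.enumerate words 0).foldl (fun s jb =>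
        if ia.1 ≠ jb.1 then
          if min_len ≤ PySem.Str.len (longest_common_prefix [ia.2, jb.2]) then
            PySem.Set.add (PySem.Set.add s ia.1) jb.1
          else s
        else s) s) PySem.Set.empty
  PySem.Set.len sharers

-- ===== PORT B =====
-- w[:k] with k = max(min_len, 0) ≥ 0 is exactly List.take k on the characters; the dict loop
-- 'counts[p] = counts.get(p, 0) + 1' is the foldl over PySem.Dict; the final sum(1 for …) is the foldl over words
def count_prefix_sharers_alt (words : List String) (min_len : Int) : Int :=
  let k : Nat := (max min_len 0).toNat
  let prefixes : List (List Char) :=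
    (words.filter (fun w => decide (k ≤ w.toList.length))).map (fun w => w.toList.take k)
  let counts : PySem.Dict (List Char) Int :=
    prefixes.foldl (fun d p => d.insert p (d.getD p 0 + 1)) PySem.Dict.empty
  words.foldl (fun t w =>
    if decide (k ≤ w.toList.length) && decide (2 ≤ counts.getD (w.toList.take k) 0) then t + 1 else t) 0


-- ===== PRECONDITION & SPEC =====
def Spec_count_prefix_sharers (words : List String) (min_len : Int) (out : Int) : Prop := out = count_prefix_sharers_alt words min_len
instance (words : List String) (min_len : Int) (out : Int) : Decidable (Spec_count_prefix_sharers words min_len out) := by unfold Spec_count_prefix_sharers; infer_instance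

-- ===== CLAIM (what is proved, stated in full; the proofs are below) =====
def Claim_equal_count_prefix_sharers : Prop := ∀ (words : List String) (min_len : Int), Dom_count_prefix_sharers words min_len → Spec_count_prefix_sharers words min_len (count_prefix_sharers words min_len)

-- ===== LEMMAS AND PROOFS =====

-- common-prefix length of two character lists: the quantity both programs decide about
def cpl : List Char → List Char → Nat
  | [], _ => 0
  | _ :: _, [] => 0
  | a :: as, b :: bs => if a = b then cpl as bs + 1 else 0

theorem cpl_le_left (a b : List Char) : cpl a b ≤ a.length := by
  induction a generalizing b with
  | nil => simp [cpl]
  | cons x as ih =>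
    cases b with
    | nil => simp [cpl]
    | cons y bs =>
      simp only [cpl]
      split_ifs
      · simpa using ih bs
      · simp

theorem cpl_comm (a b : List Char) : cpl a b = cpl b a := by
  induction a generalizing b with
  | nil => cases b <;> simp [cpl]
  | cons x as ih =>
    cases b with
    | nil => simp [cpl]
    | cons y bs =>
      simp only [cpl]
      rcases eq_or_ne x y with h | h
      · subst h; simp [ih]
      · simp [h, Ne.symm h]

theorem le_cpl_iff (k : Nat) (a b : List Char) :
    k ≤ cpl a b ↔ k ≤ a.length ∧ a.take k = b.take k := by
  induction a generalizing b k with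
  | nil => cases k <;> simp [cpl]
  | cons x as ih =>
    cases b with
    | nil => cases k <;> simp [cpl]
    | cons y bs =>
      cases k with
      | zero => simp
      | succ k =>
        simp only [cpl, List.take_succ_cons, List.length_cons]
        rcases eq_or_ne x y with h | h
        · subst h
          rw [if_pos rfl]
          constructor
          · intro hk
            have h' := (ih k bs).1 (by omega)
            exact ⟨by omega, by rw [h'.2]⟩
          · rintro ⟨h1, h2⟩
            simp only [List.cons.injEq] at h2
            have := (ih k bs).2 ⟨by omega, h2.2⟩
            omega
        · rw [if_neg h]
          constructor
          · intro hk; omega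
          · rintro ⟨h1, h2⟩
            simp only [List.cons.injEq] at h2
            exact absurd h2.1 h

theorem cpl_eq_length_iff (p w : List Char) : cpl p w = p.length ↔ p <+: w := by
  constructor
  · intro h
    have h2 := (le_cpl_iff p.length p w).1 (by omega)
    rw [List.take_length] at h2
    exact h2.2 ▸ List.take_prefix _ _
  · intro h
    have h2 : p.take p.length = w.take p.length := by
      conv_lhs => rw [List.take_length]
      exact List.prefix_iff_eq_take.1 h
    have h3 := (le_cpl_iff p.length p w).2 ⟨le_rfl, h2⟩
    have h4 := cpl_le_left p w
    omega

theorem cpl_take (m : Nat) (p w : List Char) : cpl (p.take m) w = min m (cpl p w) := by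
  induction p generalizing w m with
  | nil => simp [cpl]
  | cons x as ih =>
    cases m with
    | zero => simp [cpl]
    | succ m =>
      cases w with
      | nil => simp [cpl]
      | cons y bs =>
        simp only [List.take_succ_cons, cpl]
        split_ifs
        · rw [ih]; omega
        · simp

theorem cpl_dropLast (p w : List Char) (h : cpl p w < p.length) :
    cpl p.dropLast w = cpl p w := by
  rw [List.dropLast_eq_take, cpl_take]
  omega


theorem pvShrink_spec (w p : List Char) :
    pvShrink w p = if p ≠ [] ∧ cpl p w = 0 then none else some (p.take (cpl p w)) := by
  fun_induction pvShrink w p with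
  | case1 p h =>
    rw [PySem.Chars.startswith_iff] at h
    have hc : cpl p w = p.length := (cpl_eq_length_iff p w).2 h
    cases p with
    | nil => simp [hc]
    | cons x xs =>
      rw [if_neg (by simp [hc])]
      simp [hc]
  | case2 p h pd heq =>
    have hp : p ≠ [] := by
      rintro rfl
      rw [show PySem.Chars.startswith w [] = true from
        (PySem.Chars.startswith_iff w []).2 (List.nil_prefix)] at h
      simp at h
    have hlt : cpl p w < p.length := by
      have h1 := cpl_le_left p w
      have h2 : ¬ p <+: w := by
        intro hpre
        rw [← PySem.Chars.startswith_iff] at hpre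
        simp [hpre] at h
      have h3 : cpl p w ≠ p.length := fun hh => h2 ((cpl_eq_length_iff p w).1 hh)
      omega
    have hlen : p.length ≤ 1 := by
      have h5 : pd.length = p.length - 1 := by simp [pd]
      rw [heq] at h5
      simp at h5
      omega
    rw [if_pos ⟨hp, by omega⟩]
  | case3 p h pd hne ih =>
    have hp : p ≠ [] := by
      rintro rfl
      exact hne rfl
    have hlt : cpl p w < p.length := by
      have h1 := cpl_le_left p w
      have h2 : ¬ p <+: w := by
        intro hpre
        rw [← PySem.Chars.startswith_iff] at hpre
        simp [hpre] at h
      have h3 : cpl p w ≠ p.length := fun hh => h2 ((cpl_eq_length_iff p w).1 hh)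
      omega
    have hpd : pd = p.dropLast := rfl
    rw [ih, hpd, cpl_dropLast p w hlt]
    have hlen1 : 1 ≤ p.length := List.length_pos_of_ne_nil hp
    have hdne : p.dropLast ≠ [] := hne
    by_cases hc : cpl p w = 0
    · rw [if_pos ⟨hdne, hc⟩, if_pos ⟨hp, hc⟩]
    · rw [if_neg (by tauto), if_neg (by tauto)]
      rw [List.dropLast_eq_take, List.take_take]
      congr 2
      omega


theorem lcp_len (a b : String) :
    PySem.Str.len (longest_common_prefix [a, b]) = (cpl a.toList b.toList : Int) := by
  show PySem.Str.len (match pvShrink b.toList a.toList with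
    | none => "" | some p => String.ofList p) = _
  rw [pvShrink_spec]
  split_ifs with h
  · rw [h.2]
    simp [PySem.Str.len_eq]
  · have hle : cpl a.toList b.toList ≤ a.toList.length := cpl_le_left _ _
    simp only [PySem.Str.len_eq]
    simp [List.length_take]
    have hL : a.toList.length = a.length := by simp
    omega


def pvGood (k : Nat) (a b : List Char) : Bool :=
  decide (k ≤ a.length) && (a.take k == b.take k)


theorem pvGood_iff (k : Nat) (a b : List Char) :
    pvGood k a b = true ↔ k ≤ cpl a b := by
  rw [le_cpl_iff]
  simp [pvGood]

theorem pvGood_comm (k : Nat) (a b : List Char) : pvGood k a b = pvGood k b a := by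
  rw [Bool.eq_iff_iff, pvGood_iff, pvGood_iff, cpl_comm a b]


theorem cond_iff (min_len : Int) (a b : String) :
    (min_len ≤ PySem.Str.len (longest_common_prefix [a, b]))
      ↔ pvGood (max min_len 0).toNat a.toList b.toList = true := by
  rw [lcp_len, pvGood_iff]
  omega


theorem mem_inner (P Q : Int × String → Prop) [DecidablePred P] [DecidablePred Q]
    (l : List (Int × String)) (s : PySem.Set Int) (i x : Int) :
    x ∈ l.foldl (fun s jb => if P jb then (if Q jb then PySem.Set.add (PySem.Set.add s i) jb.1 else s) else s) s
      ↔ x ∈ s ∨ ∃ jb ∈ l, P jb ∧ Q jb ∧ (x = i ∨ x = jb.1) := by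
  induction l generalizing s with
  | nil => simp
  | cons jb l ih =>
    simp only [List.foldl_cons]
    rw [ih]
    by_cases h1 : P jb
    · by_cases h2 : Q jb
      · rw [if_pos h1, if_pos h2]
        simp only [PySem.Set.mem_add, List.mem_cons]
        constructor
        · rintro (((h | h) | h) | ⟨c, hc, h⟩)
          · exact Or.inl h
          · exact Or.inr ⟨jb, Or.inl rfl, h1, h2, Or.inl h⟩
          · exact Or.inr ⟨jb, Or.inl rfl, h1, h2, Or.inr h⟩
          · exact Or.inr ⟨c, Or.inr hc, h⟩
        · rintro (h | ⟨c, hcm, hp, hq, h⟩)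
          · exact Or.inl (Or.inl (Or.inl h))
          · rcases hcm with rfl | hc
            · rcases h with h | h
              · exact Or.inl (Or.inl (Or.inr h))
              · exact Or.inl (Or.inr h)
            · exact Or.inr ⟨c, hc, hp, hq, h⟩
      · rw [if_pos h1, if_neg h2]
        constructor
        · rintro (h | ⟨c, hc, h⟩)
          · exact Or.inl h
          · exact Or.inr ⟨c, List.mem_cons_of_mem _ hc, h⟩
        · rintro (h | ⟨c, hc, hp, hq, h⟩)
          · exact Or.inl h
          · rcases List.mem_cons.1 hc with rfl | hc
            · exact absurd hq h2
            · exact Or.inr ⟨c, hc, hp, hq, h⟩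
    · rw [if_neg h1]
      constructor
      · rintro (h | ⟨c, hc, h⟩)
        · exact Or.inl h
        · exact Or.inr ⟨c, List.mem_cons_of_mem _ hc, h⟩
      · rintro (h | ⟨c, hc, hp, hq, h⟩)
        · exact Or.inl h
        · rcases List.mem_cons.1 hc with rfl | hc
          · exact absurd hp h1
          · exact Or.inr ⟨c, hc, hp, hq, h⟩

theorem nodup_inner (P Q : Int × String → Prop) [DecidablePred P] [DecidablePred Q]
    (l : List (Int × String)) (s : PySem.Set Int) (i : Int) (h : s.Nodup) :
    (l.foldl (fun s jb => if P jb then (if Q jb then PySem.Set.add (PySem.Set.add s i) jb.1 else s) else s) s).Nodup := by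
  induction l generalizing s with
  | nil => exact h
  | cons jb l ih =>
    simp only [List.foldl_cons]
    apply ih
    split_ifs
    · exact PySem.Set.nodup_add _ _ (PySem.Set.nodup_add _ _ h)
    · exact h
    · exact h

theorem mem_outer (P Q : Int × String → Int × String → Prop)
    [∀ a b, Decidable (P a b)] [∀ a b, Decidable (Q a b)]
    (l l' : List (Int × String)) (s : PySem.Set Int) (x : Int) :
    x ∈ l.foldl (fun s ia => l'.foldl (fun s jb => if P ia jb then (if Q ia jb then PySem.Set.add (PySem.Set.add s ia.1) jb.1 else s) else s) s) s
      ↔ x ∈ s ∨ ∃ ia ∈ l, ∃ jb ∈ l', P ia jb ∧ Q ia jb ∧ (x = ia.1 ∨ x = jb.1) := by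
  induction l generalizing s with
  | nil => simp
  | cons ia l ih =>
    simp only [List.foldl_cons]
    rw [ih, mem_inner]
    simp only [List.mem_cons]
    constructor
    · rintro ((h | ⟨c, hc, h⟩) | ⟨a, ha, c, hc, h⟩)
      · exact Or.inl h
      · exact Or.inr ⟨ia, Or.inl rfl, c, hc, h⟩
      · exact Or.inr ⟨a, Or.inr ha, c, hc, h⟩
    · rintro (h | ⟨a, (rfl | ha), c, hc, h⟩)
      · exact Or.inl (Or.inl h)
      · exact Or.inl (Or.inr ⟨c, hc, h⟩)
      · exact Or.inr ⟨a, ha, c, hc, h⟩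

theorem nodup_outer (P Q : Int × String → Int × String → Prop)
    [∀ a b, Decidable (P a b)] [∀ a b, Decidable (Q a b)]
    (l l' : List (Int × String)) (s : PySem.Set Int) (h : s.Nodup) :
    (l.foldl (fun s ia => l'.foldl (fun s jb => if P ia jb then (if Q ia jb then PySem.Set.add (PySem.Set.add s ia.1) jb.1 else s) else s) s) s).Nodup := by
  induction l generalizing s with
  | nil => exact h
  | cons ia l ih =>
    simp only [List.foldl_cons]
    exact ih _ (nodup_inner _ _ _ _ _ h)

theorem countP_getD_range (l : List String) (c : String → Bool) :
    (List.range l.length).countP (fun i => c (l.getD i "")) = l.countP c := by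
  induction l with
  | nil => simp
  | cons w l' ih =>
    simp only [List.length_cons, List.range_succ_eq_map, List.countP_cons, List.countP_map]
    simp only [Function.comp_def, List.getD_cons_succ, List.getD_cons_zero]
    rw [ih]

theorem two_le_countP_iff (n : Nat) (g : Nat → Bool) (i : Nat) (hi : i < n) (hgi : g i = true) :
    2 ≤ (List.range n).countP g ↔ ∃ j, j < n ∧ j ≠ i ∧ g j = true := by
  have hbridge : (List.range n).countP g = ((Finset.range n).filter (fun j => g j)).card := by
    rw [List.countP_eq_length_filter]
    simp [Finset.range, Finset.filter, Multiset.range]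
  rw [hbridge]
  have hiF : i ∈ (Finset.range n).filter (fun j => g j) := by
    simp [Finset.mem_filter, Finset.mem_range, hi, hgi]
  constructor
  · intro h
    obtain ⟨a, b, ha, hb, hab⟩ := (Finset.one_lt_card_iff (s := (Finset.range n).filter (fun j => g j))).1 (by omega)
    simp only [Finset.mem_filter, Finset.mem_range] at ha hb
    rcases eq_or_ne a i with rfl | hai
    · exact ⟨b, hb.1, fun hbi => hab hbi.symm, hb.2⟩
    · exact ⟨a, ha.1, hai, ha.2⟩
  · rintro ⟨j, hj, hji, hgj⟩
    have hjF : j ∈ (Finset.range n).filter (fun j => g j) := by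
      simp [Finset.mem_filter, Finset.mem_range, hj, hgj]
    have : 1 < ((Finset.range n).filter (fun j => g j)).card :=
      Finset.one_lt_card.2 ⟨j, hjF, i, hiF, hji⟩
    omega

theorem len_eq_countP (S : List Int) (hS : S.Nodup) (n : Nat) (g : Nat → Bool)
    (hmem : ∀ x, x ∈ S ↔ ∃ i, i < n ∧ g i = true ∧ x = (i : Int)) :
    S.length = (List.range n).countP g := by
  have hinj : Function.Injective (fun i : Nat => (i : Int)) := fun a b h => by simpa using h
  have hT : (List.map (fun i : Nat => (i : Int)) ((List.range n).filter g)).Nodup :=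
    ((List.nodup_range).filter _).map hinj
  have hperm : S.Perm (List.map (fun i : Nat => (i : Int)) ((List.range n).filter g)) := by
    rw [List.perm_ext_iff_of_nodup hS hT]
    intro x
    rw [hmem]
    simp only [List.mem_map, List.mem_filter, List.mem_range]
    constructor
    · rintro ⟨i, hi, hg, rfl⟩; exact ⟨i, ⟨hi, hg⟩, rfl⟩
    · rintro ⟨i, ⟨hi, hg⟩, rfl⟩; exact ⟨i, hi, hg, rfl⟩
  rw [hperm.length_eq, List.length_map, ← List.countP_eq_length_filter]


theorem count_prefix_sharers_eq_alt (words : List String) (min_len : Int) :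
    count_prefix_sharers words min_len = count_prefix_sharers_alt words min_len := by
  set n := words.length with hndef
  set k : Nat := (max min_len 0).toNat with hkdef
  set wd : Nat → List Char := fun i => (words.getD i "").toList with hwd
  set shareB : Nat → Bool := fun i =>
    (List.range n).any (fun j => (!(j == i)) && pvGood k (wd i) (wd j)) with hshare
  -- ===== A side =====
  set S : PySem.Set Int :=
    (PySem.List.enumerate words 0).foldl (fun s ia =>
      (PySem.List.enumerate words 0).foldl (fun s jb =>
        if ia.1 ≠ jb.1 then
          if min_len ≤ PySem.Str.len (longest_common_prefix [ia.2, jb.2]) then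
            PySem.Set.add (PySem.Set.add s ia.1) jb.1
          else s
        else s) s) PySem.Set.empty with hS
  have hAS : count_prefix_sharers words min_len = PySem.Set.len S := rfl
  have hSnodup : S.Nodup := nodup_outer _ _ _ _ _ List.nodup_nil
  have hmemS : ∀ x, x ∈ S ↔ ∃ i, i < n ∧ shareB i = true ∧ x = (i : Int) := by
    intro x
    rw [hS, mem_outer (fun ia jb => ia.1 ≠ jb.1)
      (fun ia jb => min_len ≤ PySem.Str.len (longest_common_prefix [ia.2, jb.2]))]
    show (x ∈ ([] : List Int) ∨ _) ↔ _
    simp only [List.not_mem_nil, false_or, PySem.List.mem_enumerate_iff]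
    constructor
    · rintro ⟨ia, ⟨i, hi, rfl⟩, jb, ⟨j, hj, rfl⟩, hne, hcond, hx⟩
      simp only [zero_add] at hne hcond hx
      rw [cond_iff] at hcond
      have hij : i ≠ j := fun h => hne (by simp [h])
      have hwi : words[i] = words.getD i "" := (List.getD_eq_getElem words "" hi).symm
      have hwj : words[j] = words.getD j "" := (List.getD_eq_getElem words "" hj).symm
      rcases hx with hx | hx
      · refine ⟨i, hi, ?_, hx⟩
        rw [hshare]
        simp only [List.any_eq_true, List.mem_range]
        refine ⟨j, hj, ?_⟩
        rw [Bool.and_eq_true, Bool.not_eq_true', beq_eq_false_iff_ne]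
        refine ⟨hij.symm, ?_⟩
        show pvGood k (words.getD i "").toList (words.getD j "").toList = true
        rw [← hwi, ← hwj]
        exact hcond
      · refine ⟨j, hj, ?_, hx⟩
        rw [hshare]
        simp only [List.any_eq_true, List.mem_range]
        refine ⟨i, hi, ?_⟩
        rw [Bool.and_eq_true, Bool.not_eq_true', beq_eq_false_iff_ne]
        refine ⟨hij, ?_⟩
        show pvGood k (words.getD j "").toList (words.getD i "").toList = true
        rw [← hwi, ← hwj, pvGood_comm]
        exact hcond
    · rintro ⟨i, hi, hs, rfl⟩
      rw [hshare] at hs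
      simp only [List.any_eq_true, List.mem_range] at hs
      obtain ⟨j, hj, hcond⟩ := hs
      rw [Bool.and_eq_true, Bool.not_eq_true', beq_eq_false_iff_ne] at hcond
      refine ⟨(0 + (i : Int), words[i]), ⟨i, hi, rfl⟩, (0 + (j : Int), words[j]), ⟨j, hj, rfl⟩,
        ?_, ?_, Or.inl (by simp)⟩
      · simp only [zero_add]
        intro h
        exact hcond.1 (by exact_mod_cast h.symm)
      · rw [cond_iff]
        have hwi : words[i] = words.getD i "" := (List.getD_eq_getElem words "" hi).symm
        have hwj : words[j] = words.getD j "" := (List.getD_eq_getElem words "" hj).symm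
        rw [hwi, hwj]
        exact hcond.2
  have hA : count_prefix_sharers words min_len = ((List.range n).countP shareB : Int) := by
    rw [hAS]
    show (S.length : Int) = _
    rw [len_eq_countP S hSnodup n shareB hmemS]
  -- ===== B side =====
  set prefixes : List (List Char) :=
    (words.filter (fun w => decide (k ≤ w.toList.length))).map (fun w => w.toList.take k) with hpre
  set counts : PySem.Dict (List Char) Int :=
    prefixes.foldl (fun d p => d.insert p (d.getD p 0 + 1)) PySem.Dict.empty with hcounts
  set cB : String → Bool := fun w =>
    decide (k ≤ w.toList.length) && decide (2 ≤ counts.getD (w.toList.take k) 0) with hcB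
  have hBS : count_prefix_sharers_alt words min_len = (words.countP cB : Int) := by
    show words.foldl (fun t w => if cB w then t + 1 else t) 0 = _
    rw [PySem.List.foldl_count_if cB words 0]
    omega
  have hget : ∀ p, counts.getD p 0 = (prefixes.count p : Int) := by
    intro p
    rw [hcounts, PySem.Dict.getD_foldl_insert_add_one]
    show (0 : Int) + _ = _
    omega
  have hcount : ∀ p, prefixes.count p
      = words.countP (fun v => decide (k ≤ v.toList.length) && (v.toList.take k == p)) := by
    intro p
    rw [hpre, List.count_eq_countP, List.countP_map, List.countP_filter]
    apply List.countP_congr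
    intro v _
    simp [Function.comp, Bool.and_comm]
  have hpoint : ∀ i, i < n → cB (words.getD i "") = shareB i := by
    intro i hi
    by_cases hk1 : k ≤ (wd i).length
    · have hgi : pvGood k (wd i) (wd i) = true := by simp [pvGood, hk1]
      have h2iff : (2 ≤ prefixes.count ((wd i).take k))
          ↔ ∃ j, j < n ∧ j ≠ i ∧ pvGood k (wd i) (wd j) = true := by
        rw [hcount]
        have hpg : words.countP (fun v => decide (k ≤ v.toList.length) && (v.toList.take k == (wd i).take k))
            = (List.range n).countP (fun j => pvGood k (wd j) (wd i)) := by
          have h1 : words.countP (fun v => decide (k ≤ v.toList.length) && (v.toList.take k == (wd i).take k))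
              = words.countP (fun v => pvGood k v.toList (wd i)) := rfl
          rw [h1, ← countP_getD_range words (fun v => pvGood k v.toList (wd i))]
        rw [hpg, two_le_countP_iff n _ i hi (by simpa using hgi)]
        constructor
        · rintro ⟨j, hj, hji, hg⟩
          exact ⟨j, hj, hji, by rw [pvGood_comm]; exact hg⟩
        · rintro ⟨j, hj, hji, hg⟩
          exact ⟨j, hj, hji, by rw [pvGood_comm]; exact hg⟩
      rw [hcB, hshare]
      rw [Bool.eq_iff_iff]
      simp only [Bool.and_eq_true, decide_eq_true_eq, List.any_eq_true, List.mem_range]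
      rw [hget]
      constructor
      · rintro ⟨-, h2⟩
        obtain ⟨j, hj, hji, hg⟩ := h2iff.1 (by exact_mod_cast h2)
        exact ⟨j, hj, by simpa [Bool.and_eq_true] using ⟨hji, hg⟩⟩
      · rintro ⟨j, hj, hg⟩
        have hji : j ≠ i := by simpa using hg.1
        refine ⟨hk1, ?_⟩
        have := h2iff.2 ⟨j, hj, hji, hg.2⟩
        exact_mod_cast this
    · rw [hcB, hshare]
      rw [Bool.eq_iff_iff]
      simp only [Bool.and_eq_true, decide_eq_true_eq, List.any_eq_true, List.mem_range]
      constructor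
      · rintro ⟨h1, -⟩
        exact absurd h1 hk1
      · rintro ⟨j, hj, hg⟩
        have hgp := hg.2
        simp only [pvGood, Bool.and_eq_true, decide_eq_true_eq] at hgp
        exact absurd hgp.1 hk1
  have hfin : words.countP cB = (List.range n).countP shareB := by
    rw [← countP_getD_range words cB]
    exact List.countP_congr (by
      intro i hiR
      rw [hpoint i (List.mem_range.1 hiR)])
  rw [hA, hBS, hfin]

-- ===== VERDICT (by name: the statement is the Claim_ definition above) =====
theorem count_prefix_sharers_spec : Claim_equal_count_prefix_sharers := by
  intro words min_len _
  exact count_prefix_sharers_eq_alt words min_len
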